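-- pv_equiv track=rewrite | github.com/Sahil9822/Preparation-materials | 2024_VIT Bhopal_Lions should Roar/Technical Task 3/Question 3.py | sumofSetBits
-- ===== SOURCE A (Python) =====
-- def sumofSetBits(n, setbit):
--     sum = 0
--     r = 2**n
--     for i in range(0, r):
--         count = 0
--         m = i
--         while(m != 0):
--             m = m & (m - 1)
--             count = count + 1
--         if (count == setbit):
--             sum = sum + i
--     return sum
-- ===== SOURCE B (Python) =====
-- def sumofSetBits(n, setbit):
--     # closed form: each of the n bit positions is set in C(n-1, setbit-1) of the
--     # numbers in [0, 2**n) that have exactly `setbit` set bits, so the total is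
--     # (2**n - 1) * C(n-1, setbit-1).
--     if setbit < 1 or setbit > n:
--         return 0
--     c = 1
--     for j in range(setbit - 1):
--         c = c * (n - 1 - j) // (j + 1)
--     return (2 ** n - 1) * c
-- ===== Notes on version B (the rewrite author's own statement) =====
-- stated objective: faster
-- what changed: Replaces A's enumeration of all 2^n integers with a Kernighan popcount loop per integer by the closed combinatorial formula (2^n - 1) * C(n-1, setbit-1), computing the binomial coefficient with a short multiplicative loop.
import Mathlib
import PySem

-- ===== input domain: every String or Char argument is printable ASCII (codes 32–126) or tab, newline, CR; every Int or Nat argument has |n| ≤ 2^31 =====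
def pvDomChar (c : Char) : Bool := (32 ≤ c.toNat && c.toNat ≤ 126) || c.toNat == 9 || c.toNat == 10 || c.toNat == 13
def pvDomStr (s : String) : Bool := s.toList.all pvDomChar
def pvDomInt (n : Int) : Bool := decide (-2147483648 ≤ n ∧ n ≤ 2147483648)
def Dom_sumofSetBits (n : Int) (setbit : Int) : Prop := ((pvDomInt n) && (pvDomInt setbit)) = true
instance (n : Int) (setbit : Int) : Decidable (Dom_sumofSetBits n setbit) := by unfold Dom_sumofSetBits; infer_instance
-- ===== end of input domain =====

-- B replaces A's enumeration of [0, 2**n) by the closed formula (2**n-1)*C(n-1,setbit-1) (objective: faster).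

-- ===== PORT A =====
-- the inner 'while m != 0: m = m & (m-1); count += 1'; the guard 0 < m merges 'm ≠ 0'
-- with a totality guard: the loop is only ever entered with m ≥ 0 (m comes from range(0, r)),
-- and for m < 0 Python would diverge.
def pvCountA (m : Int) (count : Int) : Int :=
  if h : 0 < m then pvCountA (PySem.Int.band m (m - 1)) (count + 1) else count
termination_by m.toNat
decreasing_by
  rw [PySem.Int.band_of_nonneg (by omega) (by omega)]
  have h3 : m.toNat &&& ((m - 1).toNat) ≤ (m - 1).toNat := Nat.and_le_right
  omega

-- Python's 2**n is ported as 2 ^ n.toNat: exact for every n admitted by Pre_ (0 ≤ n)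
def sumofSetBits (n : Int) (setbit : Int) : Int :=
  let r : Int := 2 ^ n.toNat
  (PySem.List.pyRange 0 r 1).foldl
    (fun sum i => if pvCountA i 0 = setbit then sum + i else sum) 0

-- ===== PORT B =====
def sumofSetBits_alt (n : Int) (setbit : Int) : Int :=
  if setbit < 1 ∨ n < setbit then 0
  else
    let c := (PySem.List.pyRange 0 (setbit - 1) 1).foldl
      (fun c j => PySem.Int.floordiv (c * (n - 1 - j)) (j + 1)) 1
    (2 ^ n.toNat - 1) * c

-- ===== PRECONDITION & SPEC =====
-- Pre_ excludes exactly n < 0, where Python A raises TypeError (2**n is a float handed to range)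
def Pre_sumofSetBits (n : Int) (setbit : Int) : Prop := 0 ≤ n
instance (n : Int) (setbit : Int) : Decidable (Pre_sumofSetBits n setbit) := by unfold Pre_sumofSetBits; infer_instance
def pvWitness_sumofSetBits : Int × Int := (3, 2)

def Spec_sumofSetBits (n : Int) (setbit : Int) (out : Int) : Prop := out = sumofSetBits_alt n setbit
instance (n : Int) (setbit : Int) (out : Int) : Decidable (Spec_sumofSetBits n setbit out) := by unfold Spec_sumofSetBits; infer_instance

-- ===== CLAIM (what is proved, stated in full; the proofs are below) =====
def Claim_equal_sumofSetBits : Prop := ∀ (n : Int) (setbit : Int), Dom_sumofSetBits n setbit → Pre_sumofSetBits n setbit → Spec_sumofSetBits n setbit (sumofSetBits n setbit)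

-- ===== LEMMAS AND PROOFS =====

-- population count of a natural number, via PySem's Python-exact bit_count
def pcN (a : Nat) : Nat := PySem.Int.bitCount (a : Int)

theorem pcN_zero : pcN 0 = 0 := by decide

theorem pcN_halve (a : Nat) (h : 0 < a) : pcN a = a % 2 + pcN (a / 2) := by
  unfold pcN; exact PySem.Int.bitCount_natCast h

theorem pcN_two_mul (a : Nat) : pcN (2 * a) = pcN a := by
  rcases Nat.eq_zero_or_pos a with h | h
  · subst h; rfl
  · rw [pcN_halve (2 * a) (by omega)]
    have h1 : 2 * a % 2 = 0 := by omega
    have h2 : 2 * a / 2 = a := by omega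
    rw [h1, h2]
    omega

theorem pcN_two_mul_add_one (a : Nat) : pcN (2 * a + 1) = pcN a + 1 := by
  rw [pcN_halve (2 * a + 1) (by omega)]
  have h1 : (2 * a + 1) % 2 = 1 := by omega
  have h2 : (2 * a + 1) / 2 = a := by omega
  rw [h1, h2, Nat.add_comm]

theorem pcN_eq_zero (a : Nat) (h : pcN a = 0) : a = 0 := by
  induction a using Nat.strong_induction_on with
  | _ a ih =>
    rcases Nat.eq_zero_or_pos a with h0 | h0
    · exact h0
    · rw [pcN_halve a h0] at h
      have h1 : a / 2 = 0 := ih (a / 2) (by omega) (by omega)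
      omega

-- the two bitwise identities behind Kernighan's trick
theorem land_odd (q : Nat) : (2 * q + 1) &&& (2 * q) = 2 * q := by
  apply Nat.eq_of_testBit_eq
  intro k
  rw [Nat.testBit_and]
  cases k with
  | zero => simp [Nat.testBit_zero, Nat.mul_mod_right]
  | succ k =>
    rw [Nat.testBit_succ, Nat.testBit_succ]
    have h1 : (2 * q + 1) / 2 = q := by omega
    have h2 : (2 * q) / 2 = q := by omega
    rw [h1, h2, Bool.and_self]

theorem land_even (q : Nat) (h : 0 < q) :
    (2 * q) &&& (2 * q - 1) = 2 * (q &&& (q - 1)) := by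
  apply Nat.eq_of_testBit_eq
  intro k
  rw [Nat.testBit_and]
  cases k with
  | zero =>
    have h0 : (2 * q).testBit 0 = false := by simp [Nat.testBit_zero, Nat.mul_mod_right]
    have h1 : (2 * (q &&& (q - 1))).testBit 0 = false := by
      simp [Nat.testBit_zero, Nat.mul_mod_right]
    simp [h0, h1]
  | succ k =>
    rw [Nat.testBit_succ, Nat.testBit_succ, ← Nat.testBit_and]
    have h1 : (2 * q) / 2 = q := by omega
    have h2 : (2 * q - 1) / 2 = q - 1 := by omega
    have h3 : (2 * (q &&& (q - 1))) / 2 = q &&& (q - 1) := by omega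
    rw [h1, h2, Nat.testBit_succ, h3]

-- Kernighan's step removes exactly one set bit
theorem pcN_kern (a : Nat) (h : 0 < a) : pcN (a &&& (a - 1)) + 1 = pcN a := by
  induction a using Nat.strong_induction_on with
  | _ a ih =>
    rcases Nat.even_or_odd a with ⟨q, hq⟩ | ⟨q, hq⟩
    · -- a = 2*q, q > 0
      have hq' : a = 2 * q := by omega
      have hq0 : 0 < q := by omega
      subst hq'
      rw [land_even q hq0, pcN_two_mul, pcN_two_mul q]
      exact ih q (by omega) hq0
    · -- a = 2*q + 1
      subst hq
      have h1 : 2 * q + 1 - 1 = 2 * q := by omega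
      rw [h1, land_odd q, pcN_two_mul, pcN_two_mul_add_one]

-- the ported inner while-loop computes the popcount
theorem pvCountA_eq (a : Nat) (c : Int) : pvCountA (a : Int) c = c + (pcN a : Int) := by
  induction a using Nat.strong_induction_on generalizing c with
  | _ a ih =>
    rcases Nat.eq_zero_or_pos a with h0 | h0
    · subst h0; rw [pvCountA]; simp [pcN_zero]
    · rw [pvCountA]
      have hpos : (0 : Int) < (a : Int) := by exact_mod_cast h0
      rw [dif_pos hpos]
      have hb : PySem.Int.band (a : Int) ((a : Int) - 1)
          = ((a &&& (a - 1) : Nat) : Int) := by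
        rw [PySem.Int.band_of_nonneg (by omega) (by omega)]
        have e1 : ((a : Int)).toNat = a := by omega
        have e2 : ((a : Int) - 1).toNat = a - 1 := by omega
        rw [e1, e2]
      rw [hb, ih (a &&& (a - 1)) (by have := Nat.and_le_right (n := a) (m := a - 1); omega) (c + 1)]
      have h2 := pcN_kern a h0
      omega

theorem pcN_pow_add (m : Nat) : ∀ j : Nat, j < 2 ^ m → pcN (2 ^ m + j) = pcN j + 1 := by
  induction m with
  | zero => intro j hj; interval_cases j; decide
  | succ m ih =>
    intro j hj
    have hpow : (2 : Nat) ^ (m + 1) = 2 * 2 ^ m := by rw [pow_succ]; ring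
    rcases Nat.even_or_odd j with ⟨q, hq⟩ | ⟨q, hq⟩
    · have e : 2 ^ (m + 1) + j = 2 * (2 ^ m + q) := by omega
      rw [e, pcN_two_mul, ih q (by omega)]
      have e2 : j = 2 * q := by omega
      rw [e2, pcN_two_mul]
    · have e : 2 ^ (m + 1) + j = 2 * (2 ^ m + q) + 1 := by omega
      rw [e, pcN_two_mul_add_one, ih q (by omega)]
      have e2 : j = 2 * q + 1 := by omega
      rw [e2, pcN_two_mul_add_one]

theorem pcN_le (m : Nat) : ∀ j : Nat, j < 2 ^ m → pcN j ≤ m := by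
  induction m with
  | zero => intro j hj; interval_cases j; decide
  | succ m ih =>
    intro j hj
    rcases Nat.eq_zero_or_pos j with h0 | h0
    · subst h0; rw [pcN_zero]; omega
    · rw [pcN_halve j h0]
      have hpow : (2 : Nat) ^ (m + 1) = 2 * 2 ^ m := by rw [pow_succ]; ring
      have := ih (j / 2) (by omega)
      omega

def NN (m k : Nat) : Nat := ∑ i ∈ Finset.range (2 ^ m), if pcN i = k then 1 else 0
def SN (m k : Nat) : Nat := ∑ i ∈ Finset.range (2 ^ m), if pcN i = k then i else 0

theorem NN_eq_choose (m : Nat) : ∀ k : Nat, NN m k = Nat.choose m k := by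
  induction m with
  | zero =>
    intro k
    unfold NN
    rw [pow_zero, Finset.sum_range_one]
    cases k with
    | zero => rw [if_pos pcN_zero]; rfl
    | succ p => rw [if_neg (by rw [pcN_zero]; omega), Nat.choose_eq_zero_of_lt (by omega)]
  | succ m ih =>
    intro k
    have hpow : (2 : Nat) ^ (m + 1) = 2 ^ m + 2 ^ m := by rw [pow_succ]; ring
    have hsplit : NN (m + 1) k
        = NN m k + ∑ j ∈ Finset.range (2 ^ m), (if pcN (2 ^ m + j) = k then 1 else 0) := by
      unfold NN
      rw [hpow, Finset.sum_range_add]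
    cases k with
    | zero =>
      rw [hsplit]
      have h2 : ∑ j ∈ Finset.range (2 ^ m), (if pcN (2 ^ m + j) = 0 then 1 else 0) = 0 := by
        apply Finset.sum_eq_zero
        intro j hj
        rw [pcN_pow_add m j (Finset.mem_range.mp hj)]
        simp
      rw [h2, ih 0]
      simp [Nat.choose]
    | succ k =>
      rw [hsplit]
      have h2 : ∑ j ∈ Finset.range (2 ^ m), (if pcN (2 ^ m + j) = k + 1 then 1 else 0)
          = NN m k := by
        apply Finset.sum_congr rfl
        intro j hj
        rw [pcN_pow_add m j (Finset.mem_range.mp hj)]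
        simp
      rw [h2, ih (k + 1), ih k, Nat.choose_succ_succ]
      simp only [Nat.succ_eq_add_one]
      omega

theorem SN_zero (m : Nat) : SN m 0 = 0 := by
  apply Finset.sum_eq_zero
  intro i _
  split
  · next h => exact pcN_eq_zero i h
  · rfl

theorem SN_closed (m : Nat) : ∀ k : Nat,
    SN m k = if 1 ≤ k ∧ k ≤ m then (2 ^ m - 1) * Nat.choose (m - 1) (k - 1) else 0 := by
  induction m with
  | zero =>
    intro k
    rw [if_neg (by omega : ¬ (1 ≤ k ∧ k ≤ 0))]
    unfold SN
    rw [pow_zero, Finset.sum_range_one]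
    split <;> rfl
  | succ m ih =>
    intro k
    have hpow : (2 : Nat) ^ (m + 1) = 2 ^ m + 2 ^ m := by rw [pow_succ]; ring
    have h1le : 1 ≤ (2 : Nat) ^ m := Nat.one_le_two_pow
    obtain ⟨c, hc⟩ : ∃ c, (2 : Nat) ^ m = c + 1 := ⟨2 ^ m - 1, by omega⟩
    have hsplit : SN (m + 1) k
        = SN m k + ∑ j ∈ Finset.range (2 ^ m), (if pcN (2 ^ m + j) = k then 2 ^ m + j else 0) := by
      unfold SN
      rw [hpow, Finset.sum_range_add]
    cases k with
    | zero =>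
      rw [if_neg (by omega : ¬ (1 ≤ 0 ∧ 0 ≤ m + 1))]
      exact SN_zero (m + 1)
    | succ p =>
      have h2 : ∑ j ∈ Finset.range (2 ^ m), (if pcN (2 ^ m + j) = p + 1 then 2 ^ m + j else 0)
          = 2 ^ m * NN m p + SN m p := by
        unfold NN SN
        rw [Finset.mul_sum, ← Finset.sum_add_distrib]
        apply Finset.sum_congr rfl
        intro j hj
        rw [pcN_pow_add m j (Finset.mem_range.mp hj)]
        by_cases h : pcN j = p <;> simp [h]
      rw [hsplit, h2, ih (p + 1), ih p, NN_eq_choose m p]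
      simp only [Nat.add_sub_cancel]
      rcases Nat.lt_or_ge m p with hmp | hmp
      · -- p > m: everything vanishes
        rw [if_neg (by omega : ¬ (1 ≤ p + 1 ∧ p + 1 ≤ m)),
            if_neg (by omega : ¬ (1 ≤ p ∧ p ≤ m)),
            if_neg (by omega : ¬ (1 ≤ p + 1 ∧ p + 1 ≤ m + 1)),
            Nat.choose_eq_zero_of_lt hmp]
        simp
      · -- p ≤ m
        rw [if_pos (by omega : 1 ≤ p + 1 ∧ p + 1 ≤ m + 1)]
        cases p with
        | zero =>
          rw [if_neg (by omega : ¬ (1 ≤ 0 ∧ 0 ≤ m))]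
          simp only [Nat.choose_zero_right, Nat.mul_one, Nat.add_zero]
          rcases Nat.eq_zero_or_pos m with hm | hm
          · subst hm; decide
          · rw [if_pos (by omega : 1 ≤ 0 + 1 ∧ 0 + 1 ≤ m)]
            omega
        | succ q =>
          have hx : Nat.choose (m - 1) q + Nat.choose (m - 1) (q + 1) = Nat.choose m (q + 1) := by
            obtain ⟨m', rfl⟩ : ∃ m', m = m' + 1 := ⟨m - 1, by omega⟩
            simp [Nat.choose_succ_succ]
          simp only [Nat.add_sub_cancel]
          by_cases hq : q + 2 ≤ m
          · rw [if_pos (by omega : 1 ≤ q + 1 + 1 ∧ q + 1 + 1 ≤ m),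
                if_pos (by omega : 1 ≤ q + 1 ∧ q + 1 ≤ m)]
            have e1 : (2 : Nat) ^ m - 1 = c := by omega
            have e2 : (2 : Nat) ^ (m + 1) - 1 = 2 * c + 1 := by omega
            rw [e1, e2, ← hx, hc]
            ring
          · -- q + 1 = m
            have hqm : q + 1 = m := by omega
            rw [if_neg (by omega : ¬ (1 ≤ q + 1 + 1 ∧ q + 1 + 1 ≤ m)),
                if_pos (by omega : 1 ≤ q + 1 ∧ q + 1 ≤ m)]
            have e1 : Nat.choose (m - 1) q = 1 := by
              rw [show m - 1 = q by omega]; exact Nat.choose_self q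
            have e2 : Nat.choose m (q + 1) = 1 := by rw [← hqm]; exact Nat.choose_self (q + 1)
            rw [e1, e2]
            simp only [Nat.mul_one]
            omega

theorem sum_map_range (f : Nat → Int) (n : Nat) :
    ((List.range n).map f).sum = ∑ i ∈ Finset.range n, f i := by
  induction n with
  | zero => simp
  | succ m ih => rw [List.range_succ, Finset.sum_range_succ]; simp [ih]

-- A's fold as a sum
theorem foldl_if_add (P : Int → Prop) [DecidablePred P] (l : List Int) (s : Int) :
    l.foldl (fun sum i => if P i then sum + i else sum) s
      = s + (l.map (fun i => if P i then i else 0)).sum := by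
  induction l generalizing s with
  | nil => simp
  | cons x t ih => by_cases hx : P x <;> simp [hx, ih] <;> ring

theorem sumofSetBits_as_sum (n setbit : Int) (hn : 0 ≤ n) :
    sumofSetBits n setbit
      = ∑ k ∈ Finset.range (2 ^ n.toNat),
          (if ((pcN k : Int)) = setbit then (k : Int) else 0) := by
  rw [show sumofSetBits n setbit
      = (PySem.List.pyRange 0 ((2 : Int) ^ n.toNat) 1).foldl
          (fun sum i => if pvCountA i 0 = setbit then sum + i else sum) 0 from rfl]
  rw [PySem.List.pyRange_one, foldl_if_add (fun i => pvCountA i 0 = setbit)]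
  simp only [List.map_map, Int.zero_add]
  have hlen : ((2 : Int) ^ n.toNat - 0) = ((2 ^ n.toNat : Nat) : Int) := by push_cast; ring
  rw [hlen, Int.toNat_natCast, sum_map_range]
  apply Finset.sum_congr rfl
  intro k _
  simp only [Function.comp]
  rw [pvCountA_eq k 0,
    show ((0 : Int) + ((pcN k : Nat) : Int)) = ((pcN k : Nat) : Int) by ring]

-- B's binomial loop
theorem comb_loop (K : Nat) (n : Int) (h : (K : Int) ≤ n - 1) :
    (PySem.List.pyRange 0 (K : Int) 1).foldl
        (fun c j => PySem.Int.floordiv (c * (n - 1 - j)) (j + 1)) 1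
      = (Nat.choose (n - 1).toNat K : Int) := by
  induction K with
  | zero =>
    rw [show ((0 : Nat) : Int) = (0 : Int) by rfl, PySem.List.pyRange_one_eq_nil (by omega)]
    simp
  | succ K ih =>
    have hK : ((K : Nat) : Int) ≤ n - 1 := by push_cast at h ⊢; omega
    have e1 : ((K + 1 : Nat) : Int) = ((K : Nat) : Int) + 1 := by push_cast; ring
    rw [e1, PySem.List.pyRange_one_succ_right (by omega)]
    rw [List.foldl_append, ih hK]
    simp only [List.foldl_cons, List.foldl_nil]
    set N : Nat := (n - 1).toNat with hN
    have hKN : K ≤ N := by omega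
    have e2 : n - 1 - (K : Int) = ((N - K : Nat) : Int) := by
      have : n - 1 = ((N : Nat) : Int) := by omega
      omega
    rw [e2]
    have e3 : ((Nat.choose N K : Nat) : Int) * ((N - K : Nat) : Int)
        = ((Nat.choose N K * (N - K) : Nat) : Int) := by push_cast; ring
    rw [e3]
    have e4 : ((K : Nat) : Int) + 1 = ((K + 1 : Nat) : Int) := by push_cast; ring
    rw [e4, PySem.Int.floordiv_natCast]
    rw [← Nat.choose_succ_right_eq, Nat.mul_div_cancel _ (by omega)]

-- ===== VERDICT (by name: the statement is the Claim_ definition above) =====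
theorem sumofSetBits_spec : Claim_equal_sumofSetBits := by
  intro n setbit _ hpre
  unfold Spec_sumofSetBits
  have hn : 0 ≤ n := hpre
  rw [sumofSetBits_as_sum n setbit hn]
  unfold sumofSetBits_alt
  by_cases hc : setbit < 1 ∨ n < setbit
  · rw [if_pos hc]
    apply Finset.sum_eq_zero
    intro k hk
    split
    · next heq =>
      rcases hc with hc | hc
      · -- setbit < 1 and setbit = pcN k ≥ 0: setbit = 0, so pcN k = 0, so k = 0
        have h0 : pcN k = 0 := by omega
        have : k = 0 := pcN_eq_zero k h0
        subst this; rfl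
      · -- n < setbit but pcN k ≤ n.toNat
        have hle := pcN_le n.toNat k (Finset.mem_range.mp hk)
        omega
    · rfl
  · rw [if_neg hc]
    have h1 : 1 ≤ setbit := by omega
    have h2 : setbit ≤ n := by omega
    set K : Nat := setbit.toNat with hK
    have hsb : setbit = ((K : Nat) : Int) := by omega
    have hK1 : 1 ≤ K := by omega
    have hKn : (K : Int) ≤ n := by omega
    have hKN : K ≤ n.toNat := by omega
    have hcast : ∑ k ∈ Finset.range (2 ^ n.toNat),
          (if ((pcN k : Int)) = setbit then (k : Int) else 0)
        = ((SN n.toNat K : Nat) : Int) := by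
      unfold SN
      rw [Nat.cast_sum]
      apply Finset.sum_congr rfl
      intro k _
      by_cases h : pcN k = K
      · rw [if_pos h, if_pos (by rw [h, hsb])]
      · rw [if_neg h, if_neg (by rw [hsb]; exact_mod_cast h)]
        rfl
    rw [hcast, SN_closed n.toNat K, if_pos ⟨hK1, hKN⟩]
    have e5 : setbit - 1 = ((K - 1 : Nat) : Int) := by omega
    rw [e5, comb_loop (K - 1) n (by omega)]
    have e6 : (n - 1).toNat = n.toNat - 1 := by omega
    rw [e6]
    have h1le : 1 ≤ (2 : Nat) ^ n.toNat := Nat.one_le_two_pow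
    push_cast [Nat.cast_sub h1le]
    ring
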